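-- pv_equiv track=rewrite | github.com/Colin-Bradshaw/python4 | Exercise8.py | uppercaseEven
-- ===== SOURCE A (Python) =====
-- def uppercaseEven(text):
--     # only alpha characters are considered. spaces , punctuation are skipped without indexing
--     # index begins at 0
--     isEven = True
--     ret = ""
--     for letter in text:
--         if str.isalpha(letter):
--             if isEven:
--                 ret += str.upper(letter)
--                 isEven = False
--             else:
--                 ret += str.lower(letter)
--                 isEven = True
--     return ret
-- ===== SOURCE B (Python) =====
-- def uppercaseEven(text):
--     # Consume the stream of alphabetic characters two at a time: each step
--     # emits one uppercased letter and (if present) one lowercased letter.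
--     # No toggle and no index parity is maintained anywhere.
--     alphas = filter(str.isalpha, text)
--     out = []
--     for up in alphas:
--         out.append(up.upper())
--         low = next(alphas, None)
--         if low is None:
--             break
--         out.append(low.lower())
--     return "".join(out)
-- ===== Notes on version B (the rewrite author's own statement) =====
-- stated objective: alternative
-- what changed: Replaces A's single loop with a mutable isEven toggle by pairwise consumption of the alpha-character stream: each iteration pulls two letters from one iterator and emits upper(first)+lower(second), so no parity/toggle state exists.
import Mathlib
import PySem

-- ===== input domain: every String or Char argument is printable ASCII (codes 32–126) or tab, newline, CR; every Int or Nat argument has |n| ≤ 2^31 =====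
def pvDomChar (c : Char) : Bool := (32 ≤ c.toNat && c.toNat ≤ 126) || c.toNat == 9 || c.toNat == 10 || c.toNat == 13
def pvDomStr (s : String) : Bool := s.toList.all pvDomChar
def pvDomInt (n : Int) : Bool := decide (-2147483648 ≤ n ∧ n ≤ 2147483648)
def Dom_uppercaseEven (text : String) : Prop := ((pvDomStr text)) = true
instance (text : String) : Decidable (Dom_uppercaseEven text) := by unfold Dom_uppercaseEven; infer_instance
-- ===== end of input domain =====

-- B replaces A's stateful isEven toggle by pairwise consumption of the alpha-character stream (objective: alternative).


-- ===== PORT A =====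
def uppercaseEven (text : String) : String :=
  String.mk
    (text.toList.foldl
      (fun (st : Bool × List Char) letter =>
        if PySem.Chars.isalpha letter then
          if st.1 then (false, st.2 ++ [PySem.Chars.upperChar letter])
          else (true, st.2 ++ [PySem.Chars.lowerChar letter])
        else st)
      (true, [])).2

-- ===== PORT B =====
-- pairwise consumption of the alpha stream: upper(first), lower(second), recurse
def pvPairLoop : List Char → List Char
  | [] => []
  | [up] => [PySem.Chars.upperChar up]
  | up :: low :: rest =>
      PySem.Chars.upperChar up :: PySem.Chars.lowerChar low :: pvPairLoop rest

def uppercaseEven_alt (text : String) : String :=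
  String.mk (pvPairLoop (text.toList.filter (fun c => PySem.Chars.isalpha c)))

-- ===== PRECONDITION & SPEC =====
def Spec_uppercaseEven (text : String) (out : String) : Prop := out = uppercaseEven_alt text
instance (text : String) (out : String) : Decidable (Spec_uppercaseEven text out) := by unfold Spec_uppercaseEven; infer_instance

-- ===== CLAIM (what is proved, stated in full; the proofs are below) =====
def Claim_equal_uppercaseEven : Prop := ∀ (text : String), Dom_uppercaseEven text → Spec_uppercaseEven text (uppercaseEven text)

-- ===== LEMMAS AND PROOFS =====

/-- Reference alternating-case map, parametrised by A's parity flag. -/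
def pvGo : List Char → Bool → List Char
  | [], _ => []
  | c :: cs, b =>
      (if b then PySem.Chars.upperChar c else PySem.Chars.lowerChar c) :: pvGo cs (!b)

lemma pvFoldA (l : List Char) (b : Bool) (acc : List Char) :
    (l.foldl
      (fun (st : Bool × List Char) letter =>
        if PySem.Chars.isalpha letter then
          if st.1 then (false, st.2 ++ [PySem.Chars.upperChar letter])
          else (true, st.2 ++ [PySem.Chars.lowerChar letter])
        else st)
      (b, acc)).2 = acc ++ pvGo (l.filter (fun c => PySem.Chars.isalpha c)) b := by
  induction l generalizing b acc with
  | nil => simp [pvGo]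
  | cons c cs ih =>
    by_cases h : PySem.Chars.isalpha c = true
    · cases b <;> simp [List.foldl_cons, h, ih, pvGo]
    · simp [List.foldl_cons, h, ih]

lemma pvPairLoop_eq_pvGo : ∀ l : List Char, pvPairLoop l = pvGo l true
  | [] => rfl
  | [c] => rfl
  | c :: d :: rest => by
      simp [pvPairLoop, pvGo, pvPairLoop_eq_pvGo rest]

-- ===== VERDICT (by name: the statement is the Claim_ definition above) =====
theorem uppercaseEven_spec : Claim_equal_uppercaseEven := by
  intro text _
  show uppercaseEven text = uppercaseEven_alt text
  simp only [uppercaseEven, uppercaseEven_alt, pvFoldA, pvPairLoop_eq_pvGo,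
    List.nil_append]
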